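-- pv_equiv track=rewrite | github.com/sara25kh/Big-Data-Assignments | inputs/P2/pcy.py | get_frequent_pairs
-- ===== SOURCE A (Python) =====
-- def get_frequent_pairs(data, min_support, frequent_items):
--     pair_counts = {}
--     frequent_pairs = {}
--
--     # Counting occurrences of pairs of items
--     for basket in data:
--         for i in range(len(basket)):
--             for j in range(i+1, len(basket)):
--                 item1 = basket[i]
--                 item2 = basket[j]
--
--                 # Sorting the items to ensure consistent pair representation
--                 pair = tuple(sorted([item1, item2]))
--
--                 if pair in pair_counts:
--                     pair_counts[pair] += 1
--                 else:
--                     pair_counts[pair] = 1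
--
--     # Filtering frequent pairs based on minimum support and valid items
--     frequent_pairs = {pair: count for pair, count in pair_counts.items() if count >= min_support
--                       and pair[0] in frequent_items and pair[1] in frequent_items}
--
--     return frequent_pairs
-- ===== SOURCE B (Python) =====
-- def get_frequent_pairs(data, min_support, frequent_items):
--     # PCY-style pruning: drop non-frequent items from each basket BEFORE
--     # generating pairs; a pair can only survive the final filter if both of
--     # its items are frequent, so this counts exactly the surviving pairs.
--     fset = set(frequent_items)
--     counts = {}
--     for basket in data:
--         rest = [x for x in basket if x in fset]
--         while rest:
--             a = rest[0]
--             rest = rest[1:]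
--             for b in rest:
--                 pair = (a, b) if a <= b else (b, a)
--                 counts[pair] = counts.get(pair, 0) + 1
--     return {p: c for p, c in counts.items() if c >= min_support}
-- ===== Notes on version B (the rewrite author's own statement) =====
-- stated objective: faster
-- what changed: B prunes every basket to the frequent items (via a set) before generating pairs and only applies the support threshold at the end, instead of counting all O(k^2) pairs per basket and filtering pair items afterwards.
import Mathlib
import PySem

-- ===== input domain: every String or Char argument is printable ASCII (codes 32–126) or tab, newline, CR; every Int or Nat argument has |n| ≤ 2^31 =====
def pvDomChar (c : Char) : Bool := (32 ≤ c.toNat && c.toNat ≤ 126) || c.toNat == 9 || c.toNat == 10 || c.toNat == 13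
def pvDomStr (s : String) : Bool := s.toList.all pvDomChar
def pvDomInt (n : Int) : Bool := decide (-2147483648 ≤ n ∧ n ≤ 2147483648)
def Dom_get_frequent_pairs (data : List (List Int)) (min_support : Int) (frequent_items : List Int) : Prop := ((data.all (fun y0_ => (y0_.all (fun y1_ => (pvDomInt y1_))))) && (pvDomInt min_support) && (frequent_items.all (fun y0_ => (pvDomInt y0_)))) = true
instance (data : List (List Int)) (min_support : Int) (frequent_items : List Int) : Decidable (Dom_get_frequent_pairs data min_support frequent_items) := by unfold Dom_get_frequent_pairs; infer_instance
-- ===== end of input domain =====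

-- B prunes each basket to frequent items before pair generation (PCY pruning); same return value, proved below.

-- ===== PORT A =====
def get_frequent_pairs (data : List (List Int)) (min_support : Int) (frequent_items : List Int) : List (List Int × Int) :=
  let pair_counts : PySem.Dict (List Int) Int :=
    data.foldl (fun d basket =>
      (PySem.List.pyRange 0 (PySem.List.len basket) 1).foldl (fun d i =>
        (PySem.List.pyRange (i + 1) (PySem.List.len basket) 1).foldl (fun d j =>
          let item1 := PySem.List.pyGetD basket i 0   -- index i is in range, so pyGetD is exact
          let item2 := PySem.List.pyGetD basket j 0
          let pair := PySem.List.sorted [item1, item2] id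
          if d.contains pair then d.insert pair (d.getD pair 0 + 1)
          else d.insert pair 1) d) d) PySem.Dict.empty
  -- dict comprehension over the items of a dict (unique keys) = filter of the items list;
  -- every key has length 2, so pair[0]/pair[1] via pyGetD is exact
  pair_counts.items.filter (fun pc =>
    decide (min_support ≤ pc.2) &&
    frequent_items.contains (PySem.List.pyGetD pc.1 0 0) &&
    frequent_items.contains (PySem.List.pyGetD pc.1 1 0))

-- ===== PORT B =====
-- the 'while rest: a = rest[0]; rest = rest[1:]; for b in rest: …' loop of Source B
def pvBInner : List Int → PySem.Dict (List Int) Int → PySem.Dict (List Int) Int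
  | [], d => d
  | a :: rest, d =>
      pvBInner rest (rest.foldl (fun d b =>
        let pair := if a ≤ b then [a, b] else [b, a]
        d.insert pair (d.getD pair 0 + 1)) d)

def get_frequent_pairs_alt (data : List (List Int)) (min_support : Int) (frequent_items : List Int) : List (List Int × Int) :=
  let fset : PySem.Set Int := PySem.Set.ofList frequent_items
  let counts : PySem.Dict (List Int) Int :=
    data.foldl (fun d basket =>
      pvBInner (basket.filter (fun x => PySem.Set.contains fset x)) d) PySem.Dict.empty
  counts.items.filter (fun pc => decide (min_support ≤ pc.2))

-- ===== PRECONDITION & SPEC =====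
def Spec_get_frequent_pairs (data : List (List Int)) (min_support : Int) (frequent_items : List Int) (out : List (List Int × Int)) : Prop := out = get_frequent_pairs_alt data min_support frequent_items
instance (data : List (List Int)) (min_support : Int) (frequent_items : List Int) (out : List (List Int × Int)) : Decidable (Spec_get_frequent_pairs data min_support frequent_items out) := by unfold Spec_get_frequent_pairs; infer_instance

-- ===== CLAIM (what is proved, stated in full; the proofs are below) =====
def Claim_equal_get_frequent_pairs : Prop := ∀ (data : List (List Int)) (min_support : Int) (frequent_items : List Int), Dom_get_frequent_pairs data min_support frequent_items → Spec_get_frequent_pairs data min_support frequent_items (get_frequent_pairs data min_support frequent_items)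

-- ===== LEMMAS AND PROOFS =====

-- the sorted two-element key both programs use
def pvKey (a b : Int) : List Int := if a ≤ b then [a, b] else [b, a]

-- the stream of pair keys a basket generates, in generation order
def pvPairs : List Int → List (List Int)
  | [] => []
  | a :: r => r.map (pvKey a) ++ pvPairs r

-- the counting step
def pvStep (d : PySem.Dict (List Int) Int) (k : List Int) : PySem.Dict (List Int) Int :=
  d.insert k (d.getD k 0 + 1)

-- tail-recursive form of the double index loop
def pvTailsFold {δ : Type} (f : δ → Int → Int → δ) : List Int → δ → δ
  | [], d => d
  | a :: r, d => pvTailsFold f r (r.foldl (fun d b => f d a b) d)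

lemma pv_sorted_pair (a b : Int) : PySem.List.sorted [a, b] id = pvKey a b := by
  by_cases h : a ≤ b <;> by_cases h2 : b < a <;>
    simp [PySem.List.sorted, PySem.List.insertBy, pvKey, h, h2] <;> omega

lemma pv_astep (d : PySem.Dict (List Int) Int) (k : List Int) :
    (if d.contains k then d.insert k (d.getD k 0 + 1) else d.insert k 1) = pvStep d k := by
  unfold pvStep
  by_cases h : d.contains k
  · simp [h]
  · simp only [Bool.not_eq_true] at h
    rw [if_neg (by simp [h]), PySem.Dict.getD_of_not_contains (h := h)]
    norm_num

lemma pv_range_shift (a b : Int) :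
    PySem.List.pyRange (a + 1) (b + 1) 1 = (PySem.List.pyRange a b 1).map (· + 1) := by
  rw [PySem.List.pyRange_one, PySem.List.pyRange_one, List.map_map]
  have : b + 1 - (a + 1) = b - a := by ring
  rw [this]
  exact List.map_congr_left (fun k _ => by simp; ring)

lemma pv_getD_cons_shift (a : Int) (r : List Int) {i : Int} (hi : 0 ≤ i) :
    PySem.List.pyGetD (a :: r) (i + 1) 0 = PySem.List.pyGetD r i 0 := by
  obtain ⟨k, rfl⟩ : ∃ k : Nat, i = (k : Int) := ⟨i.toNat, (Int.toNat_of_nonneg hi).symm⟩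
  have : (k : Int) + 1 = ((k + 1 : Nat) : Int) := by push_cast; ring
  rw [this, PySem.List.pyGetD_natCast, PySem.List.pyGetD_natCast, List.getD_cons_succ]

lemma pv_idx_fold {δ : Type} (f : δ → Int → Int → δ) (xs : List Int) (d : δ) :
    (PySem.List.pyRange 0 (xs.length : Int) 1).foldl (fun d i =>
      (PySem.List.pyRange (i + 1) (xs.length : Int) 1).foldl (fun d j =>
        f d (PySem.List.pyGetD xs i 0) (PySem.List.pyGetD xs j 0)) d) d
    = pvTailsFold f xs d := by
  induction xs generalizing d with
  | nil => simp [pvTailsFold, PySem.List.pyRange_one_eq_nil]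
  | cons a r ih =>
    have hlen : ((a :: r).length : Int) = (r.length : Int) + 1 := by simp
    rw [hlen, PySem.List.pyRange_one_cons (by positivity)]
    rw [List.foldl_cons]
    -- inner loop at i = 0
    have h0 : (PySem.List.pyRange (0 + 1) ((r.length : Int) + 1) 1).foldl (fun d j =>
        f d (PySem.List.pyGetD (a :: r) 0 0) (PySem.List.pyGetD (a :: r) j 0)) d
        = r.foldl (fun d b => f d a b) d := by
      have h1 : (PySem.List.pyGetD (a :: r) 0 0) = a := by
        simp [PySem.List.pyGetD_zero_cons]
      rw [h1]
      have := PySem.List.foldl_pyRange_pyGetD (xs := a :: r) (a := 1) (d := 0)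
        (f := fun d b => f d a b) (init := d) (by norm_num)
      simp only [PySem.List.len_eq] at this
      rw [show (0 : Int) + 1 = 1 by ring, show ((r.length : Int) + 1) = ((a :: r).length : Int) by simp]
      rw [this]
      simp
    rw [h0]
    -- remaining outer indices 1 .. n
    rw [show (0 : Int) + 1 = 0 + 1 from rfl, pv_range_shift 0 (r.length : Int), List.foldl_map]
    simp only [pvTailsFold]
    rw [← ih (r.foldl (fun d b => f d a b) d)]
    apply PySem.List.foldl_congr_mem
    intro acc i hi
    have hi' : 0 ≤ i ∧ i < (r.length : Int) := (PySem.List.mem_pyRange_one).1 hi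
    rw [pv_getD_cons_shift a r hi'.1]
    rw [show i + 1 + 1 = (i + 1) + 1 from rfl, pv_range_shift (i + 1) (r.length : Int), List.foldl_map]
    apply PySem.List.foldl_congr_mem
    intro acc2 j hj
    have hj' : i + 1 ≤ j ∧ j < (r.length : Int) := (PySem.List.mem_pyRange_one).1 hj
    rw [pv_getD_cons_shift a r (by omega)]

lemma pv_tailsFold_pairs (xs : List Int) (d : PySem.Dict (List Int) Int) :
    pvTailsFold (fun d a b => pvStep d (pvKey a b)) xs d = (pvPairs xs).foldl pvStep d := by
  induction xs generalizing d with
  | nil => rfl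
  | cons a r ih =>
    simp only [pvTailsFold, pvPairs, List.foldl_append, ih, List.foldl_map]

lemma pv_foldl_flatMap {α β δ : Type} (g : β → List α) (step : δ → α → δ) (l : List β) (d : δ) :
    l.foldl (fun d b => (g b).foldl step d) d = (l.flatMap g).foldl step d := by
  induction l generalizing d with
  | nil => rfl
  | cons x t ih => simp [List.foldl_append, ih]

lemma pv_key_all (q : Int → Bool) (a b : Int) : (pvKey a b).all q = (q a && q b) := by
  by_cases h : a ≤ b
  · simp [pvKey, h]
  · simp [pvKey, h]
    exact Bool.and_comm _ _

lemma pv_pairs_filter (q : Int → Bool) (xs : List Int) :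
    pvPairs (xs.filter q) = (pvPairs xs).filter (fun k => k.all q) := by
  induction xs with
  | nil => rfl
  | cons a r ih =>
    by_cases h : q a = true
    · rw [List.filter_cons_of_pos h]
      simp only [pvPairs, ih, List.filter_append]
      congr 1
      rw [List.filter_map]
      congr 1
      refine (List.filter_congr ?_).symm
      intro b _
      simp [Function.comp, pv_key_all, h]
    · rw [List.filter_cons_of_neg (by simp [h])]
      rw [ih]
      simp only [pvPairs, List.filter_append]
      have hz : (r.map (pvKey a)).filter (fun k => k.all q) = [] := by
        rw [List.filter_map, List.filter_eq_nil_iff.2 (fun b _ => by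
          simp [Function.comp, pv_key_all, h])]
        rfl
      rw [hz, List.nil_append]

lemma pv_mem_pvPairs {k : List Int} {xs : List Int} (h : k ∈ pvPairs xs) :
    ∃ a b, k = pvKey a b := by
  induction xs with
  | nil => simp [pvPairs] at h
  | cons a r ih =>
    simp only [pvPairs, List.mem_append, List.mem_map] at h
    rcases h with ⟨b, _, rfl⟩ | h
    · exact ⟨a, b, rfl⟩
    · exact ih h

lemma pv_discard_filter {α : Type} [BEq α] [LawfulBEq α] (p : α → Bool) (s : PySem.Set α) (x : α) :
    (PySem.Set.discard s x).filter p = PySem.Set.discard (s.filter p) x := by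
  simp only [PySem.Set.discard, List.filter_filter]
  congr 1
  funext y
  exact Bool.and_comm _ _

lemma pv_ofList_filter {α : Type} [BEq α] [LawfulBEq α] (p : α → Bool) (l : List α) :
    PySem.Set.ofList (l.filter p) = (PySem.Set.ofList l).filter p := by
  induction l with
  | nil => rfl
  | cons x t ih =>
    by_cases h : p x = true
    · rw [List.filter_cons_of_pos h, PySem.Set.ofList_cons, PySem.Set.ofList_cons,
        List.filter_cons_of_pos h, ih, pv_discard_filter]
    · rw [List.filter_cons_of_neg (by simp [h]), PySem.Set.ofList_cons,
        List.filter_cons_of_neg (by simp [h]), ih, pv_discard_filter]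
      have hd : PySem.Set.discard ((PySem.Set.ofList t).filter p) x
          = (PySem.Set.ofList t).filter p := by
        simp only [PySem.Set.discard]
        apply List.filter_eq_self.2
        intro y hy
        have hp := List.of_mem_filter hy
        simp only [Bool.not_eq_true', beq_eq_false_iff_ne, ne_eq]
        rintro rfl
        simp [h] at hp
      rw [hd]

lemma pv_bInner_eq (xs : List Int) (d : PySem.Dict (List Int) Int) :
    pvBInner xs d = (pvPairs xs).foldl pvStep d := by
  induction xs generalizing d with
  | nil => rfl
  | cons a r ih =>
    simp only [pvBInner, ih, pvPairs, List.foldl_append, List.foldl_map]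
    rfl

lemma pv_filter_flatMap {α β : Type} (g : β → List α) (P : α → Bool) (l : List β) :
    l.flatMap (fun b => (g b).filter P) = (l.flatMap g).filter P := by
  induction l with
  | nil => rfl
  | cons x t ih => simp [List.flatMap_cons, List.filter_append, ih]

lemma pv_q (freq : List Int) (x : Int) :
    List.contains (PySem.Set.ofList freq) x = freq.contains x := by
  rw [Bool.eq_iff_iff]
  simp [PySem.Set.mem_ofList]

lemma pv_getD2_zero (x y : Int) : PySem.List.pyGetD [x, y] 0 0 = x :=
  PySem.List.pyGetD_zero_cons _ _ _

lemma pv_getD2_one (x y : Int) : PySem.List.pyGetD [x, y] 1 0 = y := by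
  have : (1 : Int) = ((1 : Nat) : Int) := rfl
  rw [this, PySem.List.pyGetD_natCast]
  rfl

-- ===== VERDICT (by name: the statement is the Claim_ definition above) =====
theorem get_frequent_pairs_spec : Claim_equal_get_frequent_pairs := by
  intro data m freq _
  unfold Spec_get_frequent_pairs get_frequent_pairs get_frequent_pairs_alt
  simp only [PySem.List.len_eq, pv_sorted_pair, pv_astep,
    PySem.Set.contains_eq_listContains, pv_q, pv_bInner_eq]
  have hA : ∀ (d : PySem.Dict (List Int) Int) (basket : List Int),
      (PySem.List.pyRange 0 (basket.length : Int) 1).foldl (fun d i =>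
        (PySem.List.pyRange (i + 1) (basket.length : Int) 1).foldl (fun d j =>
          pvStep d (pvKey (PySem.List.pyGetD basket i 0) (PySem.List.pyGetD basket j 0))) d) d
      = (pvPairs basket).foldl pvStep d := by
    intro d basket
    rw [pv_idx_fold (f := fun d a b => pvStep d (pvKey a b)), pv_tailsFold_pairs]
  simp only [hA, pv_pairs_filter]
  rw [pv_foldl_flatMap, pv_foldl_flatMap]
  rw [show pvStep = fun d k => d.insert k (d.getD k 0 + 1) from rfl]
  rw [PySem.Dict.foldl_insert_getD_add_one_eq_counter,
      PySem.Dict.foldl_insert_getD_add_one_eq_counter,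
      PySem.Dict.items_counter, PySem.Dict.items_counter]
  rw [pv_filter_flatMap]
  set KA := data.flatMap pvPairs with hKA
  set PK := fun k : List Int => k.all (fun x => freq.contains x) with hPK
  rw [List.filter_map, List.filter_map, pv_ofList_filter, List.filter_filter]
  simp only [Function.comp_def]
  set S := PySem.Set.ofList KA with hS
  have hmemS : ∀ k ∈ S, ∃ a b, k = pvKey a b := by
    intro k hk
    have : k ∈ KA := (PySem.Set.mem_ofList _ _).1 hk
    obtain ⟨b0, _, hb⟩ := List.mem_flatMap.1 this
    exact pv_mem_pvPairs hb
  have hfilter : S.filter (fun k =>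
        decide (m ≤ ((List.count k KA : Nat) : Int)) &&
          freq.contains (PySem.List.pyGetD k 0 0) &&
          freq.contains (PySem.List.pyGetD k 1 0))
      = S.filter (fun k => decide (m ≤ ((List.count k (KA.filter PK) : Nat) : Int)) && PK k) := by
    apply List.filter_congr
    intro k hk
    obtain ⟨a, b, rfl⟩ := hmemS k hk
    have hPKab : PK (pvKey a b) = (freq.contains a && freq.contains b) := by
      rw [hPK]; exact pv_key_all _ a b
    by_cases h2 : a ≤ b
    · rw [show pvKey a b = [a, b] from if_pos h2] at hPKab ⊢
      rw [pv_getD2_zero, pv_getD2_one, hPKab]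
      cases hqa : freq.contains a
      · simp
      · cases hqb : freq.contains b
        · simp
        · have hcnt : List.count [a, b] (KA.filter PK) = List.count [a, b] KA :=
            List.count_filter (by rw [hPKab, hqa, hqb]; rfl)
          simp [hcnt]
    · rw [show pvKey a b = [b, a] from if_neg h2] at hPKab ⊢
      rw [pv_getD2_zero, pv_getD2_one, hPKab]
      cases hqa : freq.contains a
      · simp
      · cases hqb : freq.contains b
        · simp
        · have hcnt : List.count [b, a] (KA.filter PK) = List.count [b, a] KA :=
            List.count_filter (by rw [hPKab, hqa, hqb]; rfl)
          simp [hcnt]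
  rw [hfilter]
  apply List.map_congr_left
  intro k hk
  have hPKk : PK k = true := (Bool.and_eq_true_iff.1 (List.mem_filter.1 hk).2).2
  rw [List.count_filter hPKk]
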